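-- pv_equiv track=rewrite | github.com/Goyatuzo/python-problems | code_forces/4/b/before_an_exam.py | before_an_exam
-- ===== SOURCE A (Python) =====
-- from typing import List, Tuple
--
-- def before_an_exam(days: int, total_time: int, reqs: List[Tuple[int, int]]) -> Tuple[str, str]:
--     """
--     He has to study not less than minTime i and not more than maxTime i hours per each i-th day.
--     """
--
--     # First let's try using all of max
--     prospect = [i[1] for i in reqs]
--
--     curr_sum = sum(prospect)
--
--
--     curr_i = len(prospect) - 1
--     while curr_sum > total_time and curr_i >= 0:
--         sum_diff = curr_sum - total_time
--         necessary = reqs[curr_i][1] - sum_diff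
--
--         if necessary >= reqs[curr_i][0] and necessary <= reqs[curr_i][1]:
--             prospect[curr_i] = necessary
--
--             curr_sum += necessary
--             curr_sum -= reqs[curr_i][1]
--         else:
--             prospect[curr_i] = reqs[curr_i][0]
--             # currsum can be recomputed in constant time since we have both values
--             curr_sum += reqs[curr_i][0]
--             curr_sum -= reqs[curr_i][1]
--
--         curr_i -= 1
--
--     if sum(prospect) != total_time:
--         return ['NO', '']
--
--     return ['YES', ' '.join([str(i) for i in prospect])]
-- ===== SOURCE B (Python) =====
-- def before_an_exam(days, total_time, reqs):
--     mins = [lo for lo, hi in reqs]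
--     caps = [hi - lo for lo, hi in reqs]
--     surplus = total_time - sum(mins)
--     c_total = sum(caps)
--     if surplus == c_total:
--         return ['YES', ' '.join(str(hi) for _, hi in reqs)]
--     if surplus > c_total:
--         return ['NO', '']
--     # greatest index k whose prefix-cap sum fits inside the surplus
--     k, pk, p = -1, 0, 0
--     for i, c in enumerate(caps):
--         if p <= surplus:
--             k, pk = i, p
--         p += c
--     if k < 0:
--         return ['NO', '']
--     out = [reqs[i][1] if i < k else mins[i] + surplus - pk if i == k else mins[i]
--            for i in range(len(reqs))]
--     return ['YES', ' '.join(map(str, out))]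
-- ===== Notes on version B (the rewrite author's own statement) =====
-- stated objective: alternative
-- what changed: A starts from the all-maximum assignment and walks backward from the last day reducing hours while the running sum exceeds the total; B computes the surplus over the all-minimum assignment, finds the single transition index with one forward fold over prefix cap sums, and builds the answer positionally in closed form (max before the transition, min after, min+remainder at it).
import Mathlib
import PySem

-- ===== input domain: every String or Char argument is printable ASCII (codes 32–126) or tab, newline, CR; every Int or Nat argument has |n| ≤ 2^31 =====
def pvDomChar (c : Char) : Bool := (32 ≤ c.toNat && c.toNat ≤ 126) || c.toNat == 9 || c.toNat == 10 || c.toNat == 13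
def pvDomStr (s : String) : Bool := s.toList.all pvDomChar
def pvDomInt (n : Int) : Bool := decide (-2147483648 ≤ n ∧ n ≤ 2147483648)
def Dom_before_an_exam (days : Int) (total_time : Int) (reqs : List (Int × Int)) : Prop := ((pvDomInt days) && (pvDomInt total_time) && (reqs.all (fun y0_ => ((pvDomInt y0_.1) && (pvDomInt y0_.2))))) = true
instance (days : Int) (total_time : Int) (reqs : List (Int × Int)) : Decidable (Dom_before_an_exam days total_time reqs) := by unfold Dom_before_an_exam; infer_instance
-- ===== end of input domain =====

-- B replaces A's stateful backward reduction from the all-max assignment by a closed-form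
-- positional construction around one transition index found with a single forward fold (objective: alternative).

-- ===== PORT A =====
-- A's while loop: curr_i counts down from len-1; counter m here is curr_i+1.
-- reqs[curr_i] is always in range (0 ≤ curr_i < len), so getD is exact.
def pyAloopA (reqs : List (Int × Int)) (total_time : Int) : Nat → List Int → Int → List Int
  | 0, prospect, _ => prospect
  | Nat.succ i, prospect, curr_sum =>
    if curr_sum > total_time then
      let q := reqs.getD i (0, 0)
      let sum_diff := curr_sum - total_time
      let necessary := q.2 - sum_diff
      if necessary ≥ q.1 ∧ necessary ≤ q.2 then
        pyAloopA reqs total_time i (prospect.set i necessary) (curr_sum + necessary - q.2)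
      else
        pyAloopA reqs total_time i (prospect.set i q.1) (curr_sum + q.1 - q.2)
    else prospect

def before_an_exam (days : Int) (total_time : Int) (reqs : List (Int × Int)) : List String :=
  let prospect := reqs.map (fun i => i.2)
  let curr_sum := prospect.sum
  let final := pyAloopA reqs total_time prospect.length prospect curr_sum
  if final.sum ≠ total_time then ["NO", ""]
  else ["YES", PySem.Str.join " " (final.map (fun i => PySem.Int.toStr i))]

-- ===== PORT B =====
def before_an_exam_alt (days : Int) (total_time : Int) (reqs : List (Int × Int)) : List String :=
  let mins := reqs.map (fun p => p.1)
  let caps := reqs.map (fun p => p.2 - p.1)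
  let surplus := total_time - mins.sum
  let cTotal := caps.sum
  if surplus = cTotal then ["YES", PySem.Str.join " " (reqs.map (fun p => PySem.Int.toStr p.2))]
  else if surplus > cTotal then ["NO", ""]
  else
    let st := (PySem.List.enumerate caps 0).foldl
      (fun (st : Int × Int × Int) ic =>
        if st.2.2 ≤ surplus then (ic.1, st.2.2, st.2.2 + ic.2)
        else (st.1, st.2.1, st.2.2 + ic.2)) (-1, 0, 0)
    let k := st.1
    let pk := st.2.1
    if k < 0 then ["NO", ""]
    else
      let out := (PySem.List.pyRange 0 (PySem.List.len reqs) 1).map (fun i =>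
        if i < k then (PySem.List.pyGetD reqs i (0, 0)).2
        else if i = k then PySem.List.pyGetD mins i 0 + surplus - pk
        else PySem.List.pyGetD mins i 0)
      ["YES", PySem.Str.join " " (out.map (fun i => PySem.Int.toStr i))]

-- ===== PRECONDITION & SPEC =====
def Spec_before_an_exam (days : Int) (total_time : Int) (reqs : List (Int × Int)) (out : List String) : Prop := out = before_an_exam_alt days total_time reqs
instance (days : Int) (total_time : Int) (reqs : List (Int × Int)) (out : List String) : Decidable (Spec_before_an_exam days total_time reqs out) := by unfold Spec_before_an_exam; infer_instance

-- ===== CLAIM (what is proved, stated in full; the proofs are below) =====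
def Claim_equal_before_an_exam : Prop := ∀ (days : Int) (total_time : Int) (reqs : List (Int × Int)), Dom_before_an_exam days total_time reqs → Spec_before_an_exam days total_time reqs (before_an_exam days total_time reqs)

-- ===== LEMMAS AND PROOFS =====

-- the common "transition index": greatest k < m with prefix-cap-sum ≤ surplus, together with that prefix sum
def pvKFind (caps : List Int) (surplus : Int) : Nat → Option (Nat × Int)
  | 0 => none
  | m + 1 => if (caps.take m).sum ≤ surplus then some (m, (caps.take m).sum) else pvKFind caps surplus m

lemma pvKFind_some {caps : List Int} {surplus : Int} {m : Nat} {k : Nat} {pk : Int}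
    (h : pvKFind caps surplus m = some (k, pk)) :
    k < m ∧ pk = (caps.take k).sum ∧ (caps.take k).sum ≤ surplus := by
  induction m with
  | zero => simp [pvKFind] at h
  | succ m ih =>
    rw [pvKFind] at h
    split at h
    · rename_i hle
      obtain ⟨rfl, rfl⟩ : m = k ∧ (caps.take m).sum = pk := by
        constructor <;> [skip; skip] <;> (cases h; rfl)
      exact ⟨Nat.lt_succ_self _, rfl, hle⟩
    · obtain ⟨h1, h2, h3⟩ := ih h
      exact ⟨Nat.lt_succ_of_lt h1, h2, h3⟩

lemma pvKFind_none {caps : List Int} {surplus : Int} {m : Nat}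
    (h : pvKFind caps surplus m = none) (hm : 0 < m) : surplus < 0 := by
  induction m with
  | zero => omega
  | succ m ih =>
    rw [pvKFind] at h
    split at h
    · exact absurd h (by simp)
    · rename_i hgt
      cases Nat.eq_zero_or_pos m with
      | inl h0 => subst h0; simpa using hgt
      | inr hp => exact ih h hp

-- sums of prefixes of maxs vs mins
lemma sum_take_maxs (reqs : List (Int × Int)) :
    ∀ m, ((reqs.map (fun p => p.2)).take m).sum
      = ((reqs.map (fun p => p.1)).take m).sum + ((reqs.map (fun p => p.2 - p.1)).take m).sum := by
  intro m
  induction reqs generalizing m with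
  | nil => simp
  | cons q qs ih =>
    cases m with
    | zero => simp
    | succ m => simp [List.take_succ_cons, ih m]; ring

lemma sum_maxs (reqs : List (Int × Int)) :
    (reqs.map (fun p => p.2)).sum
      = (reqs.map (fun p => p.1)).sum + (reqs.map (fun p => p.2 - p.1)).sum := by
  induction reqs with
  | nil => simp
  | cons q qs ih => simp [ih]; ring

-- when A's guard fails at entry the loop returns its argument unchanged
lemma aloop_id (reqs : List (Int × Int)) (T : Int) (m : Nat) (P : List Int) (s : Int)
    (h : ¬ s > T) : pyAloopA reqs T m P s = P := by
  cases m <;> simp [pyAloopA, h]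

-- A's loop, characterized by pvKFind (downward induction)
lemma aloop_char (reqs : List (Int × Int)) (T : Int) :
    ∀ m, m ≤ reqs.length →
      T - (reqs.map (fun p => p.1)).sum < ((reqs.map (fun p => p.2 - p.1)).take m).sum →
      pyAloopA reqs T m
        ((reqs.map (fun p => p.2)).take m ++ (reqs.map (fun p => p.1)).drop m)
        ((reqs.map (fun p => p.1)).sum + ((reqs.map (fun p => p.2 - p.1)).take m).sum)
      = (match pvKFind (reqs.map (fun p => p.2 - p.1)) (T - (reqs.map (fun p => p.1)).sum) m with
        | none => reqs.map (fun p => p.1)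
        | some (k, pk) =>
            (reqs.map (fun p => p.2)).take k
              ++ ((reqs.map (fun p => p.1)).getD k 0 + (T - (reqs.map (fun p => p.1)).sum) - pk)
                :: (reqs.map (fun p => p.1)).drop (k + 1)) := by
  intro m
  induction m with
  | zero => intro _ _; simp [pyAloopA, pvKFind]
  | succ m ih =>
    intro hm hs
    have hmlt : m < reqs.length := hm
    have hmmax : m < (reqs.map (fun p => p.2)).length := by simpa using hmlt
    have hmmin : m < (reqs.map (fun p => p.1)).length := by simpa using hmlt
    have hmcap : m < (reqs.map (fun p => p.2 - p.1)).length := by simpa using hmlt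
    have hq : reqs.getD m (0, 0) = reqs[m] := List.getD_eq_getElem _ _ hmlt
    have hpc1 : ((reqs.map (fun p => p.2 - p.1)).take (m + 1)).sum
        = ((reqs.map (fun p => p.2 - p.1)).take m).sum + (reqs[m].2 - reqs[m].1) := by
      rw [List.take_add_one, List.getElem?_eq_getElem hmcap]
      simp
    have hmaxtake : (reqs.map (fun p => p.2)).take (m + 1)
        = (reqs.map (fun p => p.2)).take m ++ [reqs[m].2] := by
      rw [List.take_add_one, List.getElem?_eq_getElem hmmax]; simp
    have hminsdrop : (reqs.map (fun p => p.1)).drop m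
        = reqs[m].1 :: (reqs.map (fun p => p.1)).drop (m + 1) := by
      rw [List.drop_eq_getElem_cons hmmin]; simp
    have hklen : ((reqs.map (fun p => p.2)).take m).length = m := by
      simp [List.length_take]; omega
    have hset : ∀ v : Int,
        ((reqs.map (fun p => p.2)).take (m + 1)
          ++ (reqs.map (fun p => p.1)).drop (m + 1)).set m v
        = (reqs.map (fun p => p.2)).take m ++ v :: (reqs.map (fun p => p.1)).drop (m + 1) := by
      intro v
      rw [hmaxtake, List.append_assoc, List.set_append]
      simp [hklen]
    have hgd : (reqs.map (fun p => p.1)).getD m 0 = reqs[m].1 := by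
      rw [List.getD_eq_getElem _ _ hmmin, List.getElem_map]
    simp only [pyAloopA, hq]
    rw [if_pos (by omega :
      (reqs.map (fun p => p.1)).sum + ((reqs.map (fun p => p.2 - p.1)).take (m + 1)).sum > T)]
    by_cases hbr : ((reqs.map (fun p => p.2 - p.1)).take m).sum ≤ T - (reqs.map (fun p => p.1)).sum
    · rw [if_pos (by constructor <;> omega)]
      rw [hset, aloop_id _ _ _ _ _ (by omega)]
      rw [pvKFind, if_pos hbr]
      have hv : reqs[m].2 - ((reqs.map (fun p => p.1)).sum
            + ((reqs.map (fun p => p.2 - p.1)).take (m + 1)).sum - T)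
          = (reqs.map (fun p => p.1)).getD m 0 + (T - (reqs.map (fun p => p.1)).sum)
            - ((reqs.map (fun p => p.2 - p.1)).take m).sum := by
        rw [hgd]; omega
      rw [hv]
    · rw [if_neg (by intro hcon; exact hbr (by omega))]
      rw [hset]
      have harg : (reqs.map (fun p => p.1)).sum + ((reqs.map (fun p => p.2 - p.1)).take (m + 1)).sum
          + reqs[m].1 - reqs[m].2
          = (reqs.map (fun p => p.1)).sum + ((reqs.map (fun p => p.2 - p.1)).take m).sum := by
        omega
      rw [← hminsdrop, harg, ih (by omega) (by omega)]
      rw [pvKFind, if_neg hbr]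

-- B's fold, characterized by pvKFind (upward induction)
lemma bfold_char (caps : List Int) (surplus : Int) :
    ∀ m, m ≤ caps.length →
      (PySem.List.enumerate (caps.take m) 0).foldl
        (fun (st : Int × Int × Int) ic =>
          if st.2.2 ≤ surplus then (ic.1, st.2.2, st.2.2 + ic.2)
          else (st.1, st.2.1, st.2.2 + ic.2)) (-1, 0, 0)
      = (match pvKFind caps surplus m with
        | none => ((-1 : Int), (0 : Int), (caps.take m).sum)
        | some (k, pk) => ((k : Int), pk, (caps.take m).sum)) := by
  intro m
  induction m with
  | zero => intro _; simp [pvKFind, PySem.List.enumerate_nil]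
  | succ m ih =>
    intro hm
    have hmlt : m < caps.length := hm
    have htake : caps.take (m + 1) = caps.take m ++ [caps[m]] := by
      rw [List.take_add_one]; simp [List.getElem?_eq_getElem hmlt]
    have hlen : (caps.take m).length = m := by
      simp [List.length_take]; omega
    have hsum : (caps.take (m + 1)).sum = (caps.take m).sum + caps[m] := by
      rw [htake, List.sum_append, List.sum_cons, List.sum_nil]; omega
    rw [hsum]
    rw [htake, PySem.List.enumerate_append, List.foldl_append, ih (le_of_lt hmlt)]
    rw [pvKFind]
    cases hkf : pvKFind caps surplus m with
    | none =>
      by_cases hle : (caps.take m).sum ≤ surplus <;>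
        simp [PySem.List.enumerate_cons, PySem.List.enumerate_nil, hle, hlen]
    | some kp =>
      by_cases hle : (caps.take m).sum ≤ surplus <;>
        simp [PySem.List.enumerate_cons, PySem.List.enumerate_nil, hle, hlen]

-- sum of the transition-shaped list
lemma sum_trans (reqs : List (Int × Int)) (k : Nat) (v : Int) (hk : k < reqs.length) :
    ((reqs.map (fun p => p.2)).take k ++ v :: (reqs.map (fun p => p.1)).drop (k + 1)).sum
      = (reqs.map (fun p => p.1)).sum + ((reqs.map (fun p => p.2 - p.1)).take k).sum
        + v - (reqs.map (fun p => p.1)).getD k 0 := by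
  have hkm : k < (reqs.map (fun p => p.1)).length := by simpa using hk
  have h1 := sum_take_maxs reqs k
  have htake : (reqs.map (fun p => p.1)).take (k + 1)
      = (reqs.map (fun p => p.1)).take k ++ [(reqs.map (fun p => p.1))[k]] := by
    rw [List.take_add_one]; simp [List.getElem?_eq_getElem hkm]
  have hsplit : ((reqs.map (fun p => p.1)).take (k + 1)).sum
      + ((reqs.map (fun p => p.1)).drop (k + 1)).sum = (reqs.map (fun p => p.1)).sum := by
    rw [← List.sum_append, List.take_append_drop]
  have hgetD : (reqs.map (fun p => p.1)).getD k 0 = (reqs.map (fun p => p.1))[k] :=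
    List.getD_eq_getElem _ _ hkm
  rw [List.sum_append, List.sum_cons, h1, hgetD]
  rw [htake, List.sum_append, List.sum_cons, List.sum_nil] at hsplit
  omega

-- B's output list equals the transition-shaped list
lemma out_eq_trans (reqs : List (Int × Int)) (surplus pk : Int) (k : Nat) (hk : k < reqs.length) :
    ((PySem.List.pyRange 0 (PySem.List.len reqs) 1).map (fun i =>
        if i < (k : Int) then (PySem.List.pyGetD reqs i (0, 0)).2
        else if i = (k : Int) then PySem.List.pyGetD (reqs.map (fun p => p.1)) i 0 + surplus - pk
        else PySem.List.pyGetD (reqs.map (fun p => p.1)) i 0))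
      = (reqs.map (fun p => p.2)).take k
          ++ ((reqs.map (fun p => p.1)).getD k 0 + surplus - pk)
            :: (reqs.map (fun p => p.1)).drop (k + 1) := by
  have hkmins : k < (reqs.map (fun p => p.1)).length := by simpa using hk
  apply List.ext_getElem
  · simp [PySem.List.pyRange_one, List.length_take]
    omega
  · intro j h1 h2
    have hj : j < reqs.length := by
      simpa [PySem.List.pyRange_one] using h1
    have hjm : j < (reqs.map (fun p => p.1)).length := by simpa using hj
    rw [List.getElem_map]
    have hidx : (PySem.List.pyRange 0 (PySem.List.len reqs) 1)[j]'(by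
        simpa [PySem.List.pyRange_one] using h1) = (j : Int) := by
      simp [PySem.List.getElem_pyRange_one]
    rw [hidx]
    have hklen : ((reqs.map (fun p => p.2)).take k).length = k := by
      simp [List.length_take]; omega
    rcases lt_trichotomy j k with hjk | hjk | hjk
    · rw [if_pos (by exact_mod_cast hjk)]
      rw [List.getElem_append_left (by omega : j < ((reqs.map (fun p => p.2)).take k).length)]
      rw [List.getElem_take, PySem.List.pyGetD_natCast, List.getD_eq_getElem _ _ hj,
        List.getElem_map]
    · subst hjk
      rw [if_neg (by omega), if_pos rfl]
      rw [List.getElem_append_right (by omega : ((reqs.map (fun p => p.2)).take j).length ≤ j)]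
      simp [hklen, PySem.List.pyGetD_natCast]
    · rw [if_neg (by exact_mod_cast (by omega : ¬ ((j : Int) < (k : Int)))),
        if_neg (by exact_mod_cast (by omega : ¬ ((j : Int) = (k : Int))))]
      rw [List.getElem_append_right (by omega : ((reqs.map (fun p => p.2)).take k).length ≤ j)]
      rw [PySem.List.pyGetD_natCast, List.getD_eq_getElem _ _ hjm]
      have : j - ((reqs.map (fun p => p.2)).take k).length = (j - k - 1) + 1 := by
        rw [hklen]; omega
      simp only [this, List.getElem_cons_succ, List.getElem_drop]
      congr 1
      omega

-- ===== VERDICT (by name: the statement is the Claim_ definition above) =====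
theorem before_an_exam_spec : Claim_equal_before_an_exam := by
  unfold Claim_equal_before_an_exam
  intro days T reqs _
  unfold Spec_before_an_exam
  simp only [before_an_exam, before_an_exam_alt]
  have hsum := sum_maxs reqs
  rcases lt_trichotomy (T - (reqs.map (fun p => p.1)).sum)
      ((reqs.map (fun p => p.2 - p.1)).sum) with hlt | heq | hgt
  · -- surplus < cTotal : A's loop actually runs
    rw [if_neg (show ¬ (T - (reqs.map (fun p => p.1)).sum
        = (reqs.map (fun p => p.2 - p.1)).sum) by omega)]
    rw [if_neg (show ¬ (T - (reqs.map (fun p => p.1)).sum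
        > (reqs.map (fun p => p.2 - p.1)).sum) by omega)]
    have htakeM : (reqs.map (fun p => p.2)).take reqs.length = reqs.map (fun p => p.2) :=
      List.take_of_length_le (by simp)
    have htakeC : (reqs.map (fun p => p.2 - p.1)).take reqs.length
        = reqs.map (fun p => p.2 - p.1) := List.take_of_length_le (by simp)
    have hdrop : (reqs.map (fun p => p.1)).drop reqs.length = [] :=
      List.drop_eq_nil_of_le (by simp)
    have hchar := aloop_char reqs T reqs.length le_rfl (by rw [htakeC]; omega)
    rw [htakeM, htakeC, hdrop, List.append_nil] at hchar
    have hlen2 : (reqs.map (fun p => p.2)).length = reqs.length := by simp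
    have hfold := bfold_char (reqs.map (fun p => p.2 - p.1))
      (T - (reqs.map (fun p => p.1)).sum) (reqs.map (fun p => p.2 - p.1)).length le_rfl
    rw [List.take_length] at hfold
    have hlenC : (reqs.map (fun p => p.2 - p.1)).length = reqs.length := by simp
    rw [hlenC] at hfold
    rw [hlen2]
    cases hkf : pvKFind (reqs.map (fun p => p.2 - p.1))
        (T - (reqs.map (fun p => p.1)).sum) reqs.length with
    | none =>
      rw [hkf] at hchar hfold
      simp only at hchar hfold
      have hneg : T - (reqs.map (fun p => p.1)).sum < 0 := by
        rcases Nat.eq_zero_or_pos reqs.length with h0 | hp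
        · have hnil : reqs = [] := List.length_eq_zero_iff.mp h0
          subst hnil; simpa using hlt
        · exact pvKFind_none hkf hp
      rw [hsum, hchar, if_pos (by omega : (reqs.map (fun p => p.1)).sum ≠ T)]
      rw [hfold]
      norm_num
    | some kp =>
      obtain ⟨k, pk⟩ := kp
      obtain ⟨hklt, hpk, hpkle⟩ := pvKFind_some hkf
      have hkr : k < reqs.length := by simpa using hklt
      rw [hkf] at hchar hfold
      simp only at hchar hfold
      rw [hsum, hchar]
      have hS := sum_trans reqs k
        ((reqs.map (fun p => p.1)).getD k 0 + (T - (reqs.map (fun p => p.1)).sum) - pk) hkr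
      rw [if_neg (by rw [hS]; omega)]
      rw [hfold]
      rw [if_neg (by omega : ¬ ((k : Int) < 0))]
      rw [out_eq_trans reqs (T - (reqs.map (fun p => p.1)).sum) pk k hkr]
  · -- surplus = cTotal : guard fails, all-max assignment sums to exactly T
    rw [aloop_id _ _ _ _ _ (by omega : ¬ (reqs.map (fun i => i.2)).sum > T)]
    rw [if_neg (by omega : ¬ (reqs.map (fun i => i.2)).sum ≠ T)]
    rw [if_pos heq]
    simp [List.map_map, Function.comp_def]
  · -- surplus > cTotal : guard fails, all-max assignment falls short
    rw [aloop_id _ _ _ _ _ (by omega : ¬ (reqs.map (fun i => i.2)).sum > T)]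
    rw [if_pos (by omega : (reqs.map (fun i => i.2)).sum ≠ T)]
    rw [if_neg (by omega), if_pos (by omega)]
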